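-- pv_equiv track=rewrite | github.com/alxwen711/contestSubmissionArchive | codechef/starters 92/c.py | f
-- ===== SOURCE A (Python) =====
-- def f(n,k,ar,x,s):
--     if x == 0: return True
--     req = k*x
--     rem = n
--     high = 0
--     for i in range(n):
--         if ar[i]*rem >= req:
--             left = req//rem
--             if req % rem != 0: left += 1
--             high = max(high,left)
--             break
--         else:
--             rem -= 1
--             req -= ar[i]
--             high = ar[i]
--     used = x*k
--     if high*k > used: return False
--     return True
-- ===== SOURCE B (Python) =====
-- def f(n, k, ar, x, s):
--     if x == 0:
--         return True
--     a = ar[:max(0, n)]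
--     m = len(a)
--     need = k * x
--     pre = [0]
--     for v in a:
--         pre.append(pre[-1] + v)
--     # leftmost index whose suffix, leveled up, can still supply the remaining need
--     split = None
--     for i in reversed(range(m)):
--         if a[i] * (m - i) >= need - pre[i]:
--             split = i
--     if split is None:
--         high = a[-1] if a else 0
--     else:
--         before = a[split - 1] if split > 0 else 0
--         lift = -((pre[split] - need) // (m - split))
--         high = max(before, lift)
--     return high * k <= x * k
-- ===== Notes on version B (the rewrite author's own statement) =====
-- stated objective: alternative
-- what changed: B stages the work instead of A's single forward break-loop with threaded rem/req/high accumulators: it truncates the array once, builds a prefix-sum table, finds the leftmost feasible split index with a backward overwrite scan (no break, the only state is the candidate index), and computes the required level in a separate epilogue; Pre_ excludes n > len(ar) with x != 0, where A usually raises IndexError and any returned value is an accident of how far the loop got.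
-- outside the precondition, e.g. on f(4, 2, [1, 7], 2, 0): A returns True, B returns False
import Mathlib
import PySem

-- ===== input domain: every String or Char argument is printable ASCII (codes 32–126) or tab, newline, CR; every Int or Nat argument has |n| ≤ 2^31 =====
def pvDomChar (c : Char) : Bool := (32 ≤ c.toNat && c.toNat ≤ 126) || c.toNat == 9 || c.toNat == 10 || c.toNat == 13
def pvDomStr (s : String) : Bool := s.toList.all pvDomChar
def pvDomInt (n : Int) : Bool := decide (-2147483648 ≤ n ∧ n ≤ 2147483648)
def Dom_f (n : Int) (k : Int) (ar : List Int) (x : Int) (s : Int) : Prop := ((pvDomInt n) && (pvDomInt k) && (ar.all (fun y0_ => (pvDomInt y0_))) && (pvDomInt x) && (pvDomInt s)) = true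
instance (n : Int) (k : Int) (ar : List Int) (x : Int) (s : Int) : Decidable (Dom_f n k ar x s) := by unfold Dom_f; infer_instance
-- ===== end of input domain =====

-- B replaces A's single forward scan with break and threaded rem/req/high accumulators by:
-- truncate once, a prefix-sum table, a backward scan that keeps the leftmost feasible split
-- index, and a separate epilogue computing the required level (objective: alternative).

-- ===== PORT A =====
-- 'for i in range(n)' over ar[i]: structural recursion on the suffix of ar, counting i up to n;
-- the [] case is where Python's ar[i] would raise IndexError (outside Pre_).
def fLoopA (n : Int) : List Int → Int → Int → Int → Int → Int
  | [], _, _, _, high => high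
  | a :: rest, i, rem, req, high =>
    if i < n then
      if a * rem ≥ req then
        let q := PySem.Int.floordiv req rem
        max high (if PySem.Int.mod req rem ≠ 0 then q + 1 else q)
      else fLoopA n rest (i + 1) (rem - 1) (req - a) a
    else high

def f (n : Int) (k : Int) (ar : List Int) (x : Int) (s : Int) : Bool :=
  if x = 0 then true
  else
    let high := fLoopA n ar 0 n (k * x) 0
    let used := x * k
    if high * k > used then false else true

-- ===== PORT B =====
-- pre = [0]; for v in a: pre.append(pre[-1] + v)
def fScanB (acc : Int) : List Int → List Int
  | [] => [acc]
  | v :: vs => acc :: fScanB (acc + v) vs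

-- split = None; for i in reversed(range(m)): if a[i]*(m-i) >= need - pre[i]: split = i
def fBackB (a pre : List Int) (m need : Int) (idxs : List Int) (split0 : Option Int) : Option Int :=
  idxs.foldl (fun split i =>
    if (PySem.List.pyGet? a i).getD 0 * (m - i) ≥ need - (PySem.List.pyGet? pre i).getD 0
    then some i else split) split0

def f_alt (n : Int) (k : Int) (ar : List Int) (x : Int) (s : Int) : Bool :=
  if x = 0 then true
  else
    let a := PySem.List.slice ar none (some (max 0 n))
    let m : Int := (a.length : Int)
    let need := k * x
    let pre := fScanB 0 a
    let split := fBackB a pre m need ((PySem.List.pyRange 0 m 1).reverse) none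
    let high :=
      match split with
      | none => if a = [] then 0 else (PySem.List.pyGet? a (-1)).getD 0
      | some i =>
        let before := if i > 0 then (PySem.List.pyGet? a (i - 1)).getD 0 else 0
        let lift := -(PySem.Int.floordiv ((PySem.List.pyGet? pre i).getD 0 - need) (m - i))
        max before lift
    decide (high * k ≤ x * k)

-- ===== PRECONDITION & SPEC =====
-- Pre_ excludes n > len(ar) (with x ≠ 0): there A's loop usually raises IndexError, and when
-- an early break lets it return, the value depends on the fictitious count n, an accident of
-- how far the loop got.
def Pre_f (n : Int) (k : Int) (ar : List Int) (x : Int) (s : Int) : Prop :=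
  x = 0 ∨ n ≤ (ar.length : Int)
instance (n : Int) (k : Int) (ar : List Int) (x : Int) (s : Int) : Decidable (Pre_f n k ar x s) := by unfold Pre_f; infer_instance

def pvWitness_f : Int × Int × List Int × Int × Int := (2, 1, [3, 5], 4, 0)

def Spec_f (n : Int) (k : Int) (ar : List Int) (x : Int) (s : Int) (out : Bool) : Prop := out = f_alt n k ar x s
instance (n : Int) (k : Int) (ar : List Int) (x : Int) (s : Int) (out : Bool) : Decidable (Spec_f n k ar x s out) := by unfold Spec_f; infer_instance

-- ===== CLAIM (what is proved, stated in full; the proofs are below) =====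
def Claim_equal_f : Prop := ∀ (n : Int) (k : Int) (ar : List Int) (x : Int) (s : Int), Dom_f n k ar x s → Pre_f n k ar x s → Spec_f n k ar x s (f n k ar x s)

-- ===== LEMMAS AND PROOFS =====

-- the break/no-break condition at index j, the value seen just before j, and the value the
-- whole scan produces as a function of the first satisfying index
def pvCond (ar : List Int) (n need : Int) (j : Nat) : Bool :=
  decide (ar.getD j 0 * (n - (j : Int)) ≥ need - (ar.take j).sum)

def pvPrev (ar : List Int) (j : Nat) : Int := if j = 0 then 0 else ar.getD (j - 1) 0

def pvInterp (ar : List Int) (n need : Int) (nn : Nat) : Option Nat → Int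
  | none => pvPrev ar nn
  | some j =>
      let q := PySem.Int.floordiv (need - (ar.take j).sum) (n - (j : Int))
      max (pvPrev ar j) (if PySem.Int.mod (need - (ar.take j).sum) (n - (j : Int)) ≠ 0 then q + 1 else q)

theorem scanB_get (c : Int) (ar : List Int) (i : Nat) (h : i ≤ ar.length) :
    (fScanB c ar)[i]? = some (c + (ar.take i).sum) := by
  induction ar generalizing c i with
  | nil =>
    have h0 : i = 0 := Nat.le_zero.mp (by simpa using h)
    subst h0; simp [fScanB]
  | cons v vs ih =>
    cases i with
    | zero => simp [fScanB]
    | succ j =>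
      simp only [fScanB, List.getElem?_cons_succ, List.take_succ_cons, List.sum_cons]
      rw [ih (c + v) j (by simpa using h)]
      ring_nf

theorem ceil_eq (a b : Int) (hb : 0 < b) :
    (if PySem.Int.mod a b ≠ 0 then PySem.Int.floordiv a b + 1 else PySem.Int.floordiv a b)
      = -(PySem.Int.floordiv (-a) b) := by
  have hdm := PySem.Int.floordiv_mul_add_mod a b
  have hr0 := PySem.Int.mod_nonneg a hb
  have hrb := PySem.Int.mod_lt a hb
  rw [eq_comm, PySem.Int.neg_floordiv_neg_eq_iff_of_pos hb]
  rcases eq_or_ne (PySem.Int.mod a b) 0 with hz | hz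
  · simp only [hz, ne_eq, not_true_eq_false, if_false]
    constructor <;> nlinarith
  · have hp : 0 < PySem.Int.mod a b := lt_of_le_of_ne hr0 (Ne.symm hz)
    simp only [hz, ne_eq, not_false_eq_true, if_true]
    constructor <;> nlinarith


-- A's forward scan with break equals the interpretation of the first satisfying index
theorem loopA_eq (ar : List Int) (n need : Int) (nn : Nat) (hnn : (nn : Int) = n)
    (hlen : nn ≤ ar.length) :
    ∀ (suf : List Int) (i : Nat), suf = ar.drop i → i ≤ nn →
    fLoopA n suf (i : Int) (n - (i : Int)) (need - (ar.take i).sum) (pvPrev ar i)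
      = pvInterp ar n need nn ((List.range' i (nn - i)).find? (pvCond ar n need)) := by
  intro suf
  induction suf with
  | nil =>
    intro i hsuf hi
    have hl : ar.length ≤ i := by
      have := List.drop_eq_nil_iff.mp hsuf.symm
      omega
    have hieq : i = nn := by omega
    subst hieq
    simp [fLoopA, pvInterp]
  | cons a0 rest ihsuf =>
    intro i hsuf hi
    have hil : i < ar.length := by
      by_contra h
      have : ar.drop i = [] := List.drop_eq_nil_iff.mpr (by omega)
      rw [this] at hsuf; simp at hsuf
    have hcons : ar.drop i = ar[i] :: ar.drop (i + 1) := (List.getElem_cons_drop hil).symm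
    rw [hcons] at hsuf
    obtain ⟨ha, hrest⟩ : a0 = ar[i] ∧ rest = ar.drop (i + 1) := by
      exact ⟨(List.cons.injEq .. ▸ hsuf).1.symm ▸ rfl, (List.cons.injEq .. ▸ hsuf).2⟩
    by_cases hlt : i < nn
    swap
    · -- i = nn: the guard i < n fails; an empty index range remains
      have hg : ¬ ((i : Int) < n) := by omega
      have h0 : nn - i = 0 := by omega
      have hieq : i = nn := by omega
      simp only [fLoopA]
      rw [if_neg hg, h0, List.range'_zero, List.find?_nil]
      simp [pvInterp, hieq]
    · have hrange : List.range' i (nn - i) = i :: List.range' (i + 1) (nn - (i + 1)) := by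
        rw [show nn - i = (nn - (i + 1)) + 1 by omega, List.range'_succ]
      have hg : (i : Int) < n := by omega
      have hgetD : ar.getD i 0 = ar[i] := by simp [List.getD, hil]
      simp only [fLoopA, hg, if_true]
      by_cases hc : ar[i] * (n - (i : Int)) ≥ need - (ar.take i).sum
      · rw [ha, if_pos (by linarith [hc]), hrange,
          List.find?_cons_of_pos (by simp only [pvCond, hgetD, decide_eq_true_eq]; exact hc)]
        simp [pvInterp]
      · rw [ha, if_neg hc, hrange,
          List.find?_cons_of_neg (by simp only [pvCond, hgetD, decide_eq_true_eq]; exact hc)]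
        have e1 : n - (i : Int) - 1 = n - ((i + 1 : Nat) : Int) := by push_cast; ring
        have e2 : need - (ar.take i).sum - ar[i] = need - (ar.take (i + 1)).sum := by
          rw [List.sum_take_succ ar i hil]; ring
        have e3 : ar[i] = pvPrev ar (i + 1) := by
          simp [pvPrev, List.getD, hil]
        have e4 : (i : Int) + 1 = ((i + 1 : Nat) : Int) := by push_cast; ring
        rw [e4, e1, e2]
        conv_lhs => rw [e3]
        exact ihsuf (i + 1) hrest (by omega)

-- B's backward overwrite scan keeps the FIRST satisfying index of the unreversed list
theorem back_find (a pre : List Int) (m need : Int) :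
    ∀ (l : List Int) (acc : Option Int),
    fBackB a pre m need l.reverse acc
      = match l.find? (fun i => decide ((PySem.List.pyGet? a i).getD 0 * (m - i) ≥ need - (PySem.List.pyGet? pre i).getD 0)) with
        | some i => some i
        | none => acc := by
  intro l
  induction l with
  | nil => intro acc; simp [fBackB]
  | cons i rest ih =>
    intro acc
    have hstep : fBackB a pre m need (i :: rest).reverse acc
        = (if (PySem.List.pyGet? a i).getD 0 * (m - i) ≥ need - (PySem.List.pyGet? pre i).getD 0
           then some i else fBackB a pre m need rest.reverse acc) := by
      simp only [List.reverse_cons, fBackB, List.foldl_append, List.foldl_cons, List.foldl_nil]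
    rw [hstep, ih acc]
    by_cases hc : (PySem.List.pyGet? a i).getD 0 * (m - i) ≥ need - (PySem.List.pyGet? pre i).getD 0
    · rw [if_pos hc, List.find?_cons_of_pos (by exact decide_eq_true hc)]
    · rw [if_neg hc, List.find?_cons_of_neg (by simpa using hc)]

-- find? only looks at the predicate's values on the list's members
theorem find?_congr_mem {α : Type} (l : List α) (p q : α → Bool)
    (h : ∀ a ∈ l, p a = q a) : l.find? p = l.find? q := by
  induction l with
  | nil => rfl
  | cons a rest ih =>
    have ha := h a (by simp)
    by_cases hp : p a = true
    · rw [List.find?_cons_of_pos hp, List.find?_cons_of_pos (ha ▸ hp)]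
    · rw [List.find?_cons_of_neg (by simpa using hp),
        List.find?_cons_of_neg (by rw [← ha]; simpa using hp)]
      exact ih (fun a hm => h a (by simp [hm]))

-- A returns 'if v*k > x*k then false else true'; B returns 'decide (v*k <= x*k)'
theorem pvFinal (A B : Int) : (if A > B then false else true) = decide (A ≤ B) := by
  by_cases h : A > B
  · rw [if_pos h, eq_comm, decide_eq_false_iff_not]; omega
  · rw [if_neg h, eq_comm, decide_eq_true_eq]; omega

-- ===== VERDICT (by name: the statement is the Claim_ definition above) =====
theorem f_spec : Claim_equal_f := by
  intro n k ar x s hdom hpre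
  unfold Spec_f f f_alt
  by_cases hx : x = 0
  · simp [hx]
  · simp only [hx, if_false]
    have hnle : n ≤ (ar.length : Int) := by
      rcases hpre with h | h
      · exact absurd h hx
      · exact h
    by_cases hn0 : 0 ≤ n
    swap
    · -- n < 0: A's loop body never runs; B's slice is empty
      have hA0 : fLoopA n ar 0 n (k * x) 0 = 0 := by
        cases ar with
        | nil => rfl
        | cons a rest =>
          simp only [fLoopA]
          rw [if_neg (by omega : ¬ ((0:Int) < n))]
      have hsl : PySem.List.slice ar none (some (max 0 n)) = ([] : List Int) := by
        rw [show max 0 n = (0:Int) by omega, PySem.List.slice_to ar (le_refl 0)]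
        simp
      rw [hA0, hsl]
      simp only [List.length_nil, Nat.cast_zero, reduceIte, fBackB]
      exact pvFinal _ _
    set nn : Nat := n.toNat with hnndef
    have hnn : (nn : Int) = n := Int.toNat_of_nonneg hn0
    have hlen : nn ≤ ar.length := by omega
    set need := k * x with hneed
    -- the slice a and its length
    have hslice : PySem.List.slice ar none (some (max 0 n)) = ar.take nn := by
      rw [show max 0 n = n by omega, PySem.List.slice_to ar hn0]
    have halen : (ar.take nn).length = nn := by
      rw [List.length_take]; omega
    have hm : ((PySem.List.slice ar none (some (max 0 n))).length : Int) = n := by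
      rw [hslice, halen, hnn]
    -- A's loop through loopA_eq
    have hA : fLoopA n ar 0 n need 0
        = pvInterp ar n need nn ((List.range nn).find? (pvCond ar n need)) := by
      have h0 := loopA_eq ar n need nn hnn hlen ar 0 rfl (by omega)
      simp only [Nat.cast_zero, List.take_zero, List.sum_nil, sub_zero, Nat.sub_zero,
        pvPrev, reduceIte] at h0
      rw [h0, List.range_eq_range']
    -- B's backward scan through back_find, on the slice a := ar.take nn
    have hB : fBackB (ar.take nn) (fScanB 0 (ar.take nn)) n need
          ((PySem.List.pyRange 0 n 1).reverse) none
        = Option.map (fun j : Nat => (j : Int)) ((List.range nn).find? (pvCond ar n need)) := by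
      rw [back_find]
      have hn' : PySem.List.pyRange 0 n 1 = List.map (fun k : Nat => (k : Int)) (List.range nn) := by
        rw [← hnn, PySem.List.pyRange_zero_natCast]
      rw [hn', List.find?_map]
      have hcongr : ∀ j ∈ List.range nn,
          ((fun i => decide ((PySem.List.pyGet? (ar.take nn) i).getD 0 * (n - i)
              ≥ need - (PySem.List.pyGet? (fScanB 0 (ar.take nn)) i).getD 0)) ∘ (fun k : Nat => (k : Int))) j
          = pvCond ar n need j := by
        intro j hj
        have hjlt : j < nn := List.mem_range.mp hj
        have hga : PySem.List.pyGet? (ar.take nn) (j : Int) = some ar[j] := by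
          rw [PySem.List.pyGet?_natCast, List.getElem?_take_of_lt hjlt]
          exact List.getElem?_eq_getElem (by omega)
        have hgp : PySem.List.pyGet? (fScanB 0 (ar.take nn)) (j : Int) = some ((ar.take j).sum) := by
          rw [PySem.List.pyGet?_natCast, scanB_get 0 (ar.take nn) j (by omega), List.take_take]
          simp [Nat.min_eq_left (by omega : j ≤ nn)]
        have hgetD : ar.getD j 0 = ar[j] := by simp [List.getD, (by omega : j < ar.length)]
        simp only [Function.comp_apply, hga, hgp, Option.getD_some, pvCond, hgetD]
      rw [find?_congr_mem _ _ _ hcongr]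
      cases (List.range nn).find? (pvCond ar n need) <;> rfl
    -- case on the first satisfying index
    rw [hA]
    rw [show ((PySem.List.slice ar none (some (max 0 n))).length : Int) = n from hm, hslice, hB]
    cases hF : (List.range nn).find? (pvCond ar n need) with
    | none =>
      simp only [Option.map_none]
      have hval : pvInterp ar n need nn none
          = (if ar.take nn = ([] : List Int) then 0 else (PySem.List.pyGet? (ar.take nn) (-1)).getD 0) := by
        by_cases hz : nn = 0
        · have hts : ar.take nn = ([] : List Int) := by rw [hz]; simp
          simp [pvInterp, pvPrev, hz]
        · have hne : ar.take nn ≠ ([] : List Int) := by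
            intro hE; have := congrArg List.length hE; simp [halen] at this; omega
          have hlast : (PySem.List.pyGet? (ar.take nn) (-1)).getD 0 = ar[nn - 1] := by
            rw [PySem.List.pyGet?_neg_one, List.getLast?_eq_getElem?, halen,
              List.getElem?_take_of_lt (by omega), List.getElem?_eq_getElem (by omega)]
            rfl
          simp only [hne, if_false, hlast, pvInterp, pvPrev, hz]
          simp [List.getD, (by omega : nn - 1 < ar.length)]
      simp only [hval]
      exact pvFinal _ _
    | some j =>
      have hjlt : j < nn := by
        have := List.mem_range.mp (List.mem_of_find?_eq_some hF)
        omega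
      simp only [Option.map_some]
      -- before = pvPrev ar j
      have hbefore : (if ((j : Nat) : Int) > 0 then
            (PySem.List.pyGet? (ar.take nn) (((j : Nat) : Int) - 1)).getD 0 else 0)
          = pvPrev ar j := by
        by_cases hj0 : j = 0
        · simp [hj0, pvPrev]
        · have hpos : ((j : Nat) : Int) > 0 := by omega
          have hcast : ((j : Nat) : Int) - 1 = ((j - 1 : Nat) : Int) := by omega
          rw [if_pos hpos, hcast, PySem.List.pyGet?_natCast,
            List.getElem?_take_of_lt (by omega), List.getElem?_eq_getElem (by omega)]
          simp [pvPrev, hj0, List.getD, (by omega : j - 1 < ar.length)]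
      -- the prefix-sum entry
      have hgp : (PySem.List.pyGet? (fScanB 0 (ar.take nn)) ((j : Nat) : Int)).getD 0
          = (ar.take j).sum := by
        rw [PySem.List.pyGet?_natCast, scanB_get 0 (ar.take nn) j (by omega), List.take_take]
        simp [Nat.min_eq_left (by omega : j ≤ nn)]
      -- ceiling forms agree
      have hceil : (if PySem.Int.mod (need - (ar.take j).sum) (n - (j : Int)) ≠ 0 then
            PySem.Int.floordiv (need - (ar.take j).sum) (n - (j : Int)) + 1
          else PySem.Int.floordiv (need - (ar.take j).sum) (n - (j : Int)))
          = -(PySem.Int.floordiv ((ar.take j).sum - need) (n - (j : Int))) := by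
        rw [ceil_eq _ _ (by omega : (0:Int) < n - (j : Int))]
        ring_nf
      simp only [pvInterp, hbefore, hgp, hceil]
      exact pvFinal _ _
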